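-- pv_equiv track=rewrite | github.com/Carricossauro/lcc | Treino 1/apelidos.py | apelidos
-- ===== SOURCE A (Python) =====
-- def apelidos(nomes):
--     result = []
--     for pessoa in nomes:
--         quantidade = len(pessoa.split())
--         posicao = 0
--         for nome in result:
--             quant = len(nome.split())
--             if quantidade == quant:
--                 if nome > pessoa:
--                     break
--             elif quantidade > quant:
--                 break
--             posicao += 1
--         result.insert(posicao, pessoa)
--     return result
-- ===== SOURCE B (Python) =====
-- def apelidos(nomes):
--     buckets = {}
--     for pessoa in nomes:
--         k = len(pessoa.split())
--         buckets[k] = buckets.get(k, []) + [pessoa]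
--     result = []
--     for k in sorted(buckets, reverse=True):
--         result.extend(sorted(buckets[k]))
--     return result
-- ===== Notes on version B (the rewrite author's own statement) =====
-- stated objective: faster
-- what changed: A builds the result by rescanning it for each name (insertion sort on word-count desc then name); B makes one grouping pass into a word-count->names dict and then emits each bucket sorted, iterating the distinct counts in descending order.
import Mathlib
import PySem

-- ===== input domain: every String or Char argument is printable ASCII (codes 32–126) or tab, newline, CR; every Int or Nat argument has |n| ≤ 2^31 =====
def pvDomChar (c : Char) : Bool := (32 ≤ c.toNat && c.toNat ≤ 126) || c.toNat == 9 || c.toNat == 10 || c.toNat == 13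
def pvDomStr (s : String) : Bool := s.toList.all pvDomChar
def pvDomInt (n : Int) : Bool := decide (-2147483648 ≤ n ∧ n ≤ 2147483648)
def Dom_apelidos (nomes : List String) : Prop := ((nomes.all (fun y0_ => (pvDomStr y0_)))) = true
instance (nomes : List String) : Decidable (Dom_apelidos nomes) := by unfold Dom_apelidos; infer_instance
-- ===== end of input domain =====

-- B replaces A's quadratic insertion-sort rescans by one grouping pass into a word-count
-- dict followed by emitting each bucket sorted, descending by key (objective: faster).

-- len(p.split()) as Python computes it (shared by both ports)
def pvWc (s : String) : Int := ((PySem.Str.split₀ s).length : Int)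

-- ===== PORT A =====
-- A's inner 'for nome in result' loop: walks result accumulating posicao, stopping at the break
def apelidosPos (quantidade : Int) (pessoa : String) : List String → Int → Int
  | [], posicao => posicao
  | nome :: rest, posicao =>
    let quant := pvWc nome
    if quantidade = quant then
      if pessoa < nome then posicao else apelidosPos quantidade pessoa rest (posicao + 1)
    else if quantidade > quant then posicao
    else apelidosPos quantidade pessoa rest (posicao + 1)

def apelidos (nomes : List String) : List String :=
  nomes.foldl (fun result pessoa =>
    let quantidade := pvWc pessoa
    let posicao := apelidosPos quantidade pessoa result 0
    PySem.List.insert result posicao pessoa) []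

-- ===== PORT B =====
def apelidos_alt (nomes : List String) : List String :=
  let buckets : PySem.Dict Int (List String) :=
    nomes.foldl (fun d pessoa => d.modify (pvWc pessoa) [] (· ++ [pessoa])) PySem.Dict.empty
  (PySem.List.sorted buckets.keys (fun k => k) true).foldl
    (fun result k => result ++ PySem.List.sorted (buckets.getD k []) (fun x => x) false) []

-- ===== PRECONDITION & SPEC =====
def Spec_apelidos (nomes : List String) (out : List String) : Prop := out = apelidos_alt nomes
instance (nomes : List String) (out : List String) : Decidable (Spec_apelidos nomes out) := by unfold Spec_apelidos; infer_instance

-- ===== CLAIM (what is proved, stated in full; the proofs are below) =====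
def Claim_equal_apelidos : Prop := ∀ (nomes : List String), Dom_apelidos nomes → Spec_apelidos nomes (apelidos nomes)

-- ===== LEMMAS AND PROOFS =====

-- the sort key A effectively orders by: word count descending, then name ascending
def pvKey (s : String) : Lex (Int × String) := toLex (-(pvWc s), s)

theorem pvKey_injective : Function.Injective pvKey := by
  intro a b h
  have := congrArg (fun x => (ofLex x).2) h
  simpa [pvKey] using this

theorem apelidosPos_shift (q : Int) (p : String) (l : List String) (pos : Int) :
    apelidosPos q p l pos = pos + apelidosPos q p l 0 := by
  induction l generalizing pos with
  | nil => simp [apelidosPos]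
  | cons nome rest ih =>
    simp only [apelidosPos]
    split_ifs with h1 h2 h3
    · ring
    · rw [ih (pos + 1), ih (0 + 1)]; ring
    · ring
    · rw [ih (pos + 1), ih (0 + 1)]; ring

theorem apelidosPos_bounds (q : Int) (p : String) (l : List String) :
    0 ≤ apelidosPos q p l 0 ∧ apelidosPos q p l 0 ≤ l.length := by
  induction l with
  | nil => simp [apelidosPos]
  | cons nome rest ih =>
    simp only [apelidosPos, List.length_cons]
    split_ifs with h1 h2 h3
    · omega
    · rw [apelidosPos_shift]; omega
    · omega
    · rw [apelidosPos_shift]; omega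

theorem insert_cons_add_one {α : Type} (x v : α) (xs : List α) (k : Int)
    (h0 : 0 ≤ k) (h : k ≤ xs.length) :
    PySem.List.insert (x :: xs) (k + 1) v = x :: PySem.List.insert xs k v := by
  obtain ⟨n, rfl⟩ := Int.eq_ofNat_of_zero_le h0
  have hn : n ≤ xs.length := by exact_mod_cast h
  rw [show ((n : Int) + 1) = ((n + 1 : Nat) : Int) by push_cast; ring]
  rw [PySem.List.insert_natCast _ _ _ (by simpa using Nat.succ_le_succ hn),
      PySem.List.insert_natCast _ _ _ hn]
  simp

-- A's inner loop + insert is exactly insertion-by-key pvKey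
theorem apelidos_step_eq (pessoa : String) (acc : List String) :
    PySem.List.insert acc (apelidosPos (pvWc pessoa) pessoa acc 0) pessoa
      = PySem.List.insertBy (fun a b => decide (pvKey a < pvKey b)) pessoa acc := by
  induction acc with
  | nil => simp [apelidosPos, PySem.List.insertBy, PySem.List.insert_zero]
  | cons nome rest ih =>
    have hiff : (pvKey pessoa < pvKey nome) ↔
        ((pvWc pessoa = pvWc nome ∧ pessoa < nome) ∨ pvWc pessoa > pvWc nome) := by
      simp only [pvKey, Prod.Lex.lt_iff, ofLex_toLex]
      constructor
      · rintro (h | ⟨h1, h2⟩)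
        · right; simp only [gt_iff_lt]; omega
        · refine Or.inl ⟨by omega, h2⟩
      · rintro (⟨h1, h2⟩ | h)
        · right; exact ⟨by omega, h2⟩
        · left; simp only [gt_iff_lt] at h; omega
    by_cases hk : pvKey pessoa < pvKey nome
    · have hpos : apelidosPos (pvWc pessoa) pessoa (nome :: rest) 0 = 0 := by
        rcases hiff.mp hk with ⟨h1, h2⟩ | h
        · simp [apelidosPos, h1, h2]
        · have h1 : ¬ pvWc pessoa = pvWc nome := by simp only [gt_iff_lt] at h; omega
          simp [apelidosPos, h1, h]
      rw [hpos, PySem.List.insert_zero]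
      simp [PySem.List.insertBy, hk]
    · have step : apelidosPos (pvWc pessoa) pessoa (nome :: rest) 0
          = apelidosPos (pvWc pessoa) pessoa rest 0 + 1 := by
        simp only [apelidosPos]
        split_ifs with h1 h2 h3
        · exact absurd (hiff.mpr (Or.inl ⟨h1, h2⟩)) hk
        · rw [apelidosPos_shift _ _ _ (0 + 1)]; ring
        · exact absurd (hiff.mpr (Or.inr h3)) hk
        · rw [apelidosPos_shift _ _ _ (0 + 1)]; ring
      rw [step, show apelidosPos (pvWc pessoa) pessoa rest 0 + 1
            = apelidosPos (pvWc pessoa) pessoa rest 0 + 1 from rfl,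
          insert_cons_add_one _ _ _ _ (apelidosPos_bounds _ _ _).1
            (apelidosPos_bounds _ _ _).2, ih]
      simp [PySem.List.insertBy, hk]

theorem apelidos_eq_sorted (nomes : List String) :
    apelidos nomes = PySem.List.sorted nomes pvKey := by
  rw [PySem.List.sorted_eq_foldl_insertBy, apelidos]
  congr 1
  funext result pessoa
  exact apelidos_step_eq pessoa result

-- B in normal form: buckets emitted as a flatMap over the descending distinct word counts
theorem apelidos_alt_eq_flatMap (nomes : List String) :
    apelidos_alt nomes
      = (PySem.List.sorted (PySem.Set.ofList (nomes.map pvWc)) (fun k => k) true).flatMap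
          (fun k => PySem.List.sorted (nomes.filter (fun s => pvWc s == k)) (fun x => x)) := by
  unfold apelidos_alt
  have hfold : (nomes.foldl (fun d pessoa => d.modify (pvWc pessoa) [] (· ++ [pessoa]))
        PySem.Dict.empty)
      = (nomes.map (fun s => (pvWc s, s))).foldl
          (fun d p => d.modify p.1 [] (· ++ [p.2])) PySem.Dict.empty := by
    rw [List.foldl_map]
  have hgetD : ∀ k, (nomes.foldl (fun d pessoa => d.modify (pvWc pessoa) [] (· ++ [pessoa]))
        PySem.Dict.empty).getD k []
      = nomes.filter (fun s => pvWc s == k) := by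
    intro k
    rw [hfold, PySem.Dict.getD_foldl_modify_append]
    simp [List.filter_map, Function.comp_def]
  have hkeys : (nomes.foldl (fun d pessoa => d.modify (pvWc pessoa) [] (· ++ [pessoa]))
        PySem.Dict.empty).keys = PySem.Set.ofList (nomes.map pvWc) := by
    rw [PySem.Dict.keys_foldl_modify_key nomes pvWc [] (fun _ x v => v ++ [x])]
    rfl
  simp only [hgetD, hkeys]
  rw [PySem.List.foldl_append_eq_flatMap]
  simp

theorem flatMap_congr_mem {α β : Type} (ks : List α) (g g' : α → List β)
    (h : ∀ k ∈ ks, g k = g' k) : ks.flatMap g = ks.flatMap g' := by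
  induction ks with
  | nil => rfl
  | cons a as iha =>
    rw [List.flatMap_cons, List.flatMap_cons, h a (by simp),
      iha (fun k hk => h k (by simp [hk]))]

theorem flatMap_filter_perm {α : Type} (f : α → Int) (ks : List Int) (l : List α)
    (hnd : ks.Nodup) (hcov : ∀ x ∈ l, f x ∈ ks) :
    (ks.flatMap (fun k => l.filter (fun x => f x == k))).Perm l := by
  induction ks generalizing l with
  | nil =>
    have : l = [] := List.eq_nil_iff_forall_not_mem.mpr (fun x hx => by simpa using hcov x hx)
    simp [this]
  | cons k ks ih =>
    rw [List.flatMap_cons]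
    have hnd' : ks.Nodup := hnd.of_cons
    have hknotin : k ∉ ks := by simpa using (List.nodup_cons.mp hnd).1
    set l' := l.filter (fun x => !(f x == k)) with hl'
    have hsame : ∀ k' ∈ ks, l.filter (fun x => f x == k') = l'.filter (fun x => f x == k') := by
      intro k' hk'
      rw [hl', List.filter_filter]
      apply List.filter_congr
      intro x _
      by_cases hx : f x = k'
      · have hne : k' ≠ k := fun hc => hknotin (hc ▸ hk')
        simp [hx, hne]
      · simp [hx]
    have hflat : ks.flatMap (fun k' => l.filter (fun x => f x == k'))
        = ks.flatMap (fun k' => l'.filter (fun x => f x == k')) :=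
      flatMap_congr_mem ks _ _ hsame
    have hcov' : ∀ x ∈ l', f x ∈ ks := by
      intro x hx
      rw [hl', List.mem_filter] at hx
      have hm := hcov x hx.1
      have hne : ¬ f x = k := by simpa using hx.2
      rcases List.mem_cons.mp hm with h | h
      · exact absurd h hne
      · exact h
    rw [hflat]
    refine List.Perm.trans ?_ (List.filter_append_perm (fun x => f x == k) l)
    exact List.Perm.append_left _ (ih l' hnd' hcov')

theorem pairwise_key_flatMap (nomes : List String) (ks : List Int)
    (hksgt : ks.Pairwise (fun a b => b < a)) :
    List.Pairwise (fun a b => pvKey a ≤ pvKey b)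
      (ks.flatMap (fun k => PySem.List.sorted (nomes.filter (fun s => pvWc s == k))
        (fun x => x))) := by
  induction ks with
  | nil => simp
  | cons k ks ih =>
    rw [List.flatMap_cons, List.pairwise_append]
    obtain ⟨hhead, htail⟩ := List.pairwise_cons.mp hksgt
    refine ⟨?_, ih htail, ?_⟩
    · have hmem : ∀ x ∈ PySem.List.sorted (nomes.filter (fun s => pvWc s == k)) (fun x => x),
          pvWc x = k := by
        intro x hx
        rw [PySem.List.mem_sorted, List.mem_filter] at hx
        simpa using hx.2
      have hp : (PySem.List.sorted (nomes.filter (fun s => pvWc s == k)) (fun x => x)).Pairwise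
          (fun a b => a ≤ b) := PySem.List.sorted_pairwise _ (fun x => x)
      refine List.Pairwise.imp_of_mem ?_ hp
      intro a b ha hb hle
      rw [pvKey, pvKey, Prod.Lex.le_iff]
      right
      simp only [ofLex_toLex]
      exact ⟨by rw [hmem a ha, hmem b hb], hle⟩
    · intro a ha b hb
      rw [PySem.List.mem_sorted, List.mem_filter] at ha
      rw [List.mem_flatMap] at hb
      obtain ⟨k', hk', hb⟩ := hb
      rw [PySem.List.mem_sorted, List.mem_filter] at hb
      have hak : pvWc a = k := by simpa using ha.2
      have hbk : pvWc b = k' := by simpa using hb.2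
      have hlt : k' < k := hhead k' hk'
      rw [pvKey, pvKey, Prod.Lex.le_iff]
      left
      simp only [ofLex_toLex]
      omega

theorem apelidos_spec' (nomes : List String) : apelidos nomes = apelidos_alt nomes := by
  rw [apelidos_eq_sorted, apelidos_alt_eq_flatMap]
  set ks := PySem.List.sorted (PySem.Set.ofList (nomes.map pvWc)) (fun k => k) true with hks
  have hksnd : ks.Nodup :=
    (PySem.List.sorted_perm _ _ _).nodup_iff.mpr (PySem.Set.nodup_ofList _)
  have hksle : ks.Pairwise (fun a b => b ≤ a) := PySem.List.sorted_pairwise_rev _ (fun k => k)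
  have hksgt : ks.Pairwise (fun a b => b < a) :=
    (hksle.and hksnd).imp (fun h => lt_of_le_of_ne h.1 (Ne.symm h.2))
  apply PySem.List.eq_of_perm_of_pairwise_le_of_injective pvKey pvKey_injective
  · refine (PySem.List.sorted_perm _ _ _).trans ?_
    refine List.Perm.trans ((flatMap_filter_perm pvWc ks nomes hksnd ?_).symm)
      (List.Perm.flatMap_left ks
        (fun k _ => (PySem.List.sorted_perm (nomes.filter (fun s => pvWc s == k))
          (fun x => x) false).symm))
    intro x hx
    rw [hks, PySem.List.mem_sorted]
    exact (PySem.Set.mem_ofList _ _).mpr (List.mem_map_of_mem hx)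
  · exact PySem.List.sorted_pairwise nomes pvKey
  · exact pairwise_key_flatMap nomes ks hksgt

-- ===== VERDICT (by name: the statement is the Claim_ definition above) =====
theorem apelidos_spec : Claim_equal_apelidos := by
  intro nomes _
  unfold Spec_apelidos
  exact apelidos_spec' nomes
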